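-- pv_equiv track=rewrite | github.com/ImJiyun/Algorithm | 프로그래머스/0/181926. 수 조작하기 1/수 조작하기 1.py | solution
-- ===== SOURCE A (Python) =====
-- def solution(n, control):
--     # for ch in control:
--     #     if ch == "w":
--     #         n += 1
--     #     elif ch == "s":
--     #         n -= 1
--     #     elif ch == "d":
--     #         n += 10
--     #     else:
--     #         n -= 10
--     d = {
--         'w': 1,
--         's': -1,
--         'd': 10,
--         'a' : -10
--     }
--     for ch in control:
--         n += d[ch]
--     return n
-- ===== SOURCE B (Python) =====
-- def solution(n, control):
--     counts = {}
--     for ch in control: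
--         counts[ch] = counts.get(ch, 0) + 1
--     return (n + counts.get('w', 0) - counts.get('s', 0)
--               + 10 * counts.get('d', 0) - 10 * counts.get('a', 0))
-- ===== Notes on version B (the rewrite author's own statement) =====
-- stated objective: alternative
-- what changed: B builds a frequency table of the control string in one tallying pass and then combines the four counts in a closed-form expression (n + w - s + 10d - 10a), instead of A's per-character delta-dict accumulation into n.
import Mathlib
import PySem

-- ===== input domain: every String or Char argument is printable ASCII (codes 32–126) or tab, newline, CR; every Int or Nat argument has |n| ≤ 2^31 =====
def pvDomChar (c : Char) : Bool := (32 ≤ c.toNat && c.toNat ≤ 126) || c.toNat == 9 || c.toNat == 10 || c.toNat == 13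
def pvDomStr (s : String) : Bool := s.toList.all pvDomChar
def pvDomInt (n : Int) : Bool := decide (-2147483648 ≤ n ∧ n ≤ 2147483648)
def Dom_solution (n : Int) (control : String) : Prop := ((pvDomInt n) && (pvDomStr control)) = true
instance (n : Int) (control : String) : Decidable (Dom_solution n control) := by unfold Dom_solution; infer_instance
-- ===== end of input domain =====

-- B tallies character frequencies in one pass and combines the four counts in a closed form, instead of A's per-character delta-dict accumulation.

-- ===== PORT A =====
-- the dict d of A
def dA : PySem.Dict Char Int :=
  (((PySem.Dict.empty.insert 'w' 1).insert 's' (-1)).insert 'd' 10).insert 'a' (-10)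

-- 'n += d[ch]' : d[ch] raises KeyError for ch outside {'w','s','d','a'}; those inputs are excluded by Pre_solution, inside it getD is exact
def solution (n : Int) (control : String) : Int :=
  control.toList.foldl (fun acc ch => acc + dA.getD ch 0) n

-- ===== PORT B =====
-- counts[ch] = counts.get(ch, 0) + 1, then the closed-form combination of the four counts
def solution_alt (n : Int) (control : String) : Int :=
  let counts : PySem.Dict Char Int :=
    control.toList.foldl (fun d ch => d.insert ch (d.getD ch 0 + 1)) PySem.Dict.empty
  n + counts.getD 'w' 0 - counts.getD 's' 0
    + 10 * counts.getD 'd' 0 - 10 * counts.getD 'a' 0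

-- ===== PRECONDITION & SPEC =====
-- Pre_ excludes control strings containing a character outside {'w','s','d','a'}: there A's d[ch] raises KeyError.
def Pre_solution (n : Int) (control : String) : Prop :=
  (control.toList.all (fun c => c == 'w' || c == 's' || c == 'd' || c == 'a')) = true
instance (n : Int) (control : String) : Decidable (Pre_solution n control) := by unfold Pre_solution; infer_instance
def pvWitness_solution : Int × String := (4, "wsd")

def Spec_solution (n : Int) (control : String) (out : Int) : Prop := out = solution_alt n control
instance (n : Int) (control : String) (out : Int) : Decidable (Spec_solution n control out) := by unfold Spec_solution; infer_instance

-- ===== CLAIM (what is proved, stated in full; the proofs are below) =====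
def Claim_equal_solution : Prop := ∀ (n : Int) (control : String), Dom_solution n control → Pre_solution n control → Spec_solution n control (solution n control)

-- ===== LEMMAS AND PROOFS =====

-- A's accumulation over a wsda-only list equals the closed-form combination of the four counts
theorem pv_foldA (l : List Char) :
    ∀ n : Int, (∀ c ∈ l, c = 'w' ∨ c = 's' ∨ c = 'd' ∨ c = 'a') →
      l.foldl (fun acc ch => acc + dA.getD ch 0) n
        = n + (l.count 'w' : Int) - (l.count 's' : Int)
            + 10 * (l.count 'd' : Int) - 10 * (l.count 'a' : Int) := by
  induction l with
  | nil => intro n _; simp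
  | cons x t ih =>
    intro n h
    have hx := h x (by simp)
    have ht : ∀ c ∈ t, c = 'w' ∨ c = 's' ∨ c = 'd' ∨ c = 'a' :=
      fun c hc => h c (by simp [hc])
    simp only [List.foldl_cons]
    rw [ih _ ht]
    have hw : dA.getD 'w' 0 = 1 := by decide
    have hs : dA.getD 's' 0 = -1 := by decide
    have hd : dA.getD 'd' 0 = 10 := by decide
    have ha : dA.getD 'a' 0 = -10 := by decide
    rcases hx with rfl | rfl | rfl | rfl
    · rw [hw]; simp; ring
    · rw [hs]; simp; ring
    · rw [hd]; simp; ring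
    · rw [ha]; simp; ring

-- ===== VERDICT (by name: the statement is the Claim_ definition above) =====
theorem solution_spec : Claim_equal_solution := by
  intro n control _ hpre
  unfold Spec_solution solution solution_alt
  simp only [PySem.Dict.getD_foldl_insert_add_one]
  have hp : ∀ c ∈ control.toList, c = 'w' ∨ c = 's' ∨ c = 'd' ∨ c = 'a' := by
    intro c hc
    have hb := List.all_eq_true.mp hpre c hc
    simp only [Bool.or_eq_true, beq_iff_eq] at hb
    tauto
  rw [pv_foldA control.toList n hp]
  simp
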